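-- pv_equiv track=rewrite | github.com/AlanFermat/leetcode | Facebook/numOfSetK.py | numberOfSet
-- ===== SOURCE A (Python) =====
-- def numberOfSet(nums, target):
-- 	nums = list(set(nums))
-- 	n = len(nums)
-- 	i = 0
-- 	nums = sorted(nums)
-- 	cnt = 0
-- 	for k in range(n):
-- 		if target <= nums[k]:
-- 			break
-- 		cnt += 1
-- 	while i < n:
-- 		j = n-1
-- 		while j > i:
-- 			if nums[i] + nums[j] < target:
-- 				cnt += 2**(j-i-1)
-- 				j -= 1
-- 			elif nums[i] + nums[j] >= target:
-- 				j -= 1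
-- 		i += 1
-- 	return cnt
-- ===== SOURCE B (Python) =====
-- def numberOfSet(nums, target):
--     a = sorted(set(nums))
--     cnt = sum(1 for x in a if x < target)
--     l, r = 0, len(a) - 1
--     while l < r:
--         if a[l] + a[r] < target:
--             cnt += 2 ** (r - l) - 1
--             l += 1
--         else:
--             r -= 1
--     return cnt
-- ===== Notes on version B (the rewrite author's own statement) =====
-- stated objective: faster
-- what changed: A's quadratic descending inner scan (adding 2**(j-i-1) per valid j) and its break-loop over singletons are replaced by a single two-pointer sweep over the sorted deduplicated list that adds the geometric-series closed form 2**(r-l)-1 per left endpoint, plus a direct count of elements below target.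
import Mathlib
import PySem

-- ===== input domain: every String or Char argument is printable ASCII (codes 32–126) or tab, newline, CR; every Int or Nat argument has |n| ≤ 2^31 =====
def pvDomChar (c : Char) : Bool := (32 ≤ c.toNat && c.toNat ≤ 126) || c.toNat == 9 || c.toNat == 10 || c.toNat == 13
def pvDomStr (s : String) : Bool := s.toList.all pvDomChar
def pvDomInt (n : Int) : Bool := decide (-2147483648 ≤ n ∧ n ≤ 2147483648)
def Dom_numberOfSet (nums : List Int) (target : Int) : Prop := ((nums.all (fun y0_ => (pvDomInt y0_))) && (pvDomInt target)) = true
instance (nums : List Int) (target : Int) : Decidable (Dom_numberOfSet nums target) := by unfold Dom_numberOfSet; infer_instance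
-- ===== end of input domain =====

-- B replaces A's quadratic descending inner scan by a two-pointer pass with the
-- geometric-series closed form 2^(r-l)-1 per left endpoint (objective: faster).

-- ===== PORT A =====
-- first for-loop: for k in range(n): if target <= nums[k]: break; cnt += 1
def pvA_cntLoop (a : List Int) (t : Int) (n k : Nat) (cnt : Int) : Int :=
  if k < n then
    if t ≤ a.getD k 0 then cnt else pvA_cntLoop a t n (k+1) (cnt+1)
  else cnt
termination_by n - k

-- inner while: while j > i: if a[i]+a[j] < t: cnt += 2**(j-i-1); j -= 1 elif …: j -= 1
def pvA_inner (a : List Int) (t : Int) (i j : Nat) (cnt : Int) : Int :=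
  if i < j then
    if a.getD i 0 + a.getD j 0 < t then
      pvA_inner a t i (j-1) (cnt + 2^(j-i-1))
    else
      pvA_inner a t i (j-1) cnt
  else cnt
termination_by j

-- outer while: while i < n: (inner loop with j = n-1); i += 1
def pvA_outer (a : List Int) (t : Int) (n i : Nat) (cnt : Int) : Int :=
  if i < n then pvA_outer a t n (i+1) (pvA_inner a t i (n-1) cnt) else cnt
termination_by n - i

def numberOfSet (nums : List Int) (target : Int) : Int :=
  let d := PySem.Set.ofList nums
  let n := d.length
  let a := PySem.List.sorted d (fun x => x) false
  let cnt := pvA_cntLoop a target n 0 0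
  pvA_outer a target n 0 cnt

-- ===== PORT B =====
-- two-pointer loop of Source B
def pvB_twoPtr (a : List Int) (t : Int) (l r : Nat) (cnt : Int) : Int :=
  if l < r then
    if a.getD l 0 + a.getD r 0 < t then
      pvB_twoPtr a t (l+1) r (cnt + 2^(r-l) - 1)
    else
      pvB_twoPtr a t l (r-1) cnt
  else cnt
termination_by r - l

def numberOfSet_alt (nums : List Int) (target : Int) : Int :=
  let a := PySem.List.sorted (PySem.Set.ofList nums) (fun x => x) false
  let cnt : Int := ((a.filter (fun x => decide (x < target))).length : Int)
  pvB_twoPtr a target 0 (a.length - 1) cnt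

-- ===== PRECONDITION & SPEC =====
def Spec_numberOfSet (nums : List Int) (target : Int) (out : Int) : Prop := out = numberOfSet_alt nums target
instance (nums : List Int) (target : Int) (out : Int) : Decidable (Spec_numberOfSet nums target out) := by unfold Spec_numberOfSet; infer_instance

-- ===== CLAIM (what is proved, stated in full; the proofs are below) =====
def Claim_equal_numberOfSet : Prop := ∀ (nums : List Int) (target : Int), Dom_numberOfSet nums target → Spec_numberOfSet nums target (numberOfSet nums target)

-- ===== LEMMAS AND PROOFS =====

-- contribution of the pair (i, j): what A's inner loop adds at index j
def pvInd (a : List Int) (t : Int) (i j : Nat) : Int :=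
  if a.getD i 0 + a.getD j 0 < t then 2^(j-i-1) else 0

-- sum of pvInd over i < j' ≤ j
def pvSrow (a : List Int) (t : Int) (i j : Nat) : Int :=
  if i < j then pvSrow a t i (j-1) + pvInd a t i j else 0
termination_by j

-- sum of full rows for i ≤ i' < n
def pvStot (a : List Int) (t : Int) (n i : Nat) : Int :=
  if i < n then pvSrow a t i (n-1) + pvStot a t n (i+1) else 0
termination_by n - i

lemma pvA_inner_eq (a : List Int) (t : Int) (i : Nat) :
    ∀ j cnt, pvA_inner a t i j cnt = cnt + pvSrow a t i j := by
  intro j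
  induction j using Nat.strong_induction_on with
  | _ j ih =>
    intro cnt
    rw [pvA_inner, pvSrow]
    by_cases h : i < j
    · simp only [h, if_pos]
      have hj : j - 1 < j := by omega
      by_cases hc : a.getD i 0 + a.getD j 0 < t
      · rw [if_pos hc, ih _ hj, pvInd, if_pos hc]; ring
      · rw [if_neg hc, ih _ hj, pvInd, if_neg hc]; ring
    · simp [h]

lemma pvA_outer_eq (a : List Int) (t : Int) (n : Nat) :
    ∀ m i cnt, n - i ≤ m → pvA_outer a t n i cnt = cnt + pvStot a t n i := by
  intro m
  induction m with
  | zero =>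
    intro i cnt h
    have hni : ¬ i < n := by omega
    rw [pvA_outer, pvStot, if_neg hni, if_neg hni]; ring
  | succ m ih =>
    intro i cnt h
    rw [pvA_outer, pvStot]
    by_cases hi : i < n
    · rw [if_pos hi, if_pos hi, ih (i+1) _ (by omega), pvA_inner_eq]; ring
    · simp [hi]

-- a row all of whose entries fail the condition sums to 0
lemma pvSrow_zero (a : List Int) (t : Int) (i : Nat) :
    ∀ j, (∀ j', i < j' → j' ≤ j → ¬ (a.getD i 0 + a.getD j' 0 < t)) →
      pvSrow a t i j = 0 := by
  intro j
  induction j using Nat.strong_induction_on with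
  | _ j ih =>
    intro hall
    rw [pvSrow]
    by_cases h : i < j
    · rw [if_pos h, ih (j-1) (by omega) (fun j' h1 h2 => hall j' h1 (by omega)),
        pvInd, if_neg (hall j h (le_refl j))]
      ring
    · simp [h]

-- entries beyond r all fail ⇒ the row up to j equals the row up to r
lemma pvSrow_trunc (a : List Int) (t : Int) (i r : Nat) :
    ∀ j, r ≤ j → (∀ j', r < j' → j' ≤ j → ¬ (a.getD i 0 + a.getD j' 0 < t)) →
      pvSrow a t i j = pvSrow a t i r := by
  intro j
  induction j using Nat.strong_induction_on with
  | _ j ih =>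
    intro hrj hall
    by_cases he : j = r
    · rw [he]
    · have hlt : r < j := by omega
      rw [pvSrow]
      by_cases h : i < j
      · rw [if_pos h, pvInd, if_neg (hall j hlt (le_refl j)),
          ih (j-1) (by omega) (by omega) (fun j' h1 h2 => hall j' h1 (by omega))]
        ring
      · have : ¬ i < r := by omega
        rw [if_neg h, pvSrow, if_neg this]

-- entries up to r all hold ⇒ geometric sum 2^(r-i) - 1
lemma pvSrow_full (a : List Int) (t : Int) (i : Nat) :
    ∀ r, i ≤ r → (∀ j', i < j' → j' ≤ r → a.getD i 0 + a.getD j' 0 < t) →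
      pvSrow a t i r = 2^(r-i) - 1 := by
  intro r
  induction r using Nat.strong_induction_on with
  | _ r ih =>
    intro hir hall
    by_cases he : r = i
    · rw [he, pvSrow]; simp
    · have h : i < r := by omega
      rw [pvSrow, if_pos h, pvInd, if_pos (hall r h (le_refl r)),
        ih (r-1) (by omega) (by omega) (fun j' h1 h2 => hall j' h1 (by omega))]
      have h1 : r - i = (r - 1 - i) + 1 := by omega
      rw [h1]
      have h2 : r - 1 - i + 1 - 1 = r - 1 - i := by omega
      rw [h2, pow_succ]
      ring

-- all rows empty ⇒ total 0
lemma pvStot_zero (a : List Int) (t : Int) (n : Nat) :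
    ∀ m i, n - i ≤ m →
      (∀ i' j', i ≤ i' → i' < j' → j' < n → ¬ (a.getD i' 0 + a.getD j' 0 < t)) →
      pvStot a t n i = 0 := by
  intro m
  induction m with
  | zero =>
    intro i h hall
    have hni : ¬ i < n := by omega
    rw [pvStot, if_neg hni]
  | succ m ih =>
    intro i h hall
    rw [pvStot]
    by_cases hi : i < n
    · rw [if_pos hi, ih (i+1) (by omega) (fun i' j' h1 h2 h3 => hall i' j' (by omega) h2 h3),
        pvSrow_zero a t i (n-1) (fun j' h1 h2 => hall i j' (le_refl i) h1 (by omega))]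
      ring
    · simp [hi]

-- the two-pointer invariant: if everything to the right of r fails for every i ≥ l,
-- the loop from (l, r) adds exactly the total of the remaining rows
lemma pvB_twoPtr_eq (a : List Int) (t : Int)
    (hsort : ∀ p q, p ≤ q → q < a.length → a.getD p 0 ≤ a.getD q 0) :
    ∀ m l r cnt, r - l ≤ m → r < a.length →
      (∀ i j, l ≤ i → i < j → j < a.length → r < j →
        ¬ (a.getD i 0 + a.getD j 0 < t)) →
      pvB_twoPtr a t l r cnt = cnt + pvStot a t a.length l := by
  intro m
  induction m with
  | zero =>
    intro l r cnt hm hr hP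
    have hlr : ¬ l < r := by omega
    rw [pvB_twoPtr, if_neg hlr,
      pvStot_zero a t a.length a.length l (by omega)
        (fun i' j' h1 h2 h3 => hP i' j' h1 h2 h3 (by omega))]
    ring
  | succ m ih =>
    intro l r cnt hm hr hP
    rw [pvB_twoPtr]
    by_cases hlr : l < r
    · rw [if_pos hlr]
      by_cases hc : a.getD l 0 + a.getD r 0 < t
      · rw [if_pos hc, ih (l+1) r _ (by omega) hr
          (fun i j h1 h2 h3 h4 => hP i j (by omega) h2 h3 h4)]
        have hrow : pvSrow a t l (a.length - 1) = 2^(r-l) - 1 := by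
          rw [pvSrow_trunc a t l r (a.length - 1) (by omega)
            (fun j' h1 h2 => hP l j' (le_refl l) (by omega) (by omega) h1)]
          exact pvSrow_full a t l r (by omega)
            (fun j' h1 h2 => lt_of_le_of_lt
              (by have := hsort j' r h2 hr; omega) hc)
        conv_rhs => rw [pvStot, if_pos (show l < a.length by omega), hrow]
        ring
      · rw [if_neg hc]
        refine ih l (r-1) cnt (by omega) (by omega) ?_
        intro i j h1 h2 h3 h4
        by_cases hj : j = r
        · subst hj
          have hal : a.getD l 0 ≤ a.getD i 0 := hsort l i h1 (by omega)
          omega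
        · exact hP i j h1 h2 h3 (by omega)
    · rw [if_neg hlr,
        pvStot_zero a t a.length a.length l (by omega)
          (fun i' j' h1 h2 h3 => hP i' j' h1 h2 h3 (by omega))]
      ring

-- A's break-loop counts, on a sorted list, exactly the elements < t
lemma pvA_cntLoop_eq (a : List Int) (t : Int)
    (hsort : ∀ p q, p ≤ q → q < a.length → a.getD p 0 ≤ a.getD q 0) :
    ∀ m k cnt, a.length - k ≤ m →
      pvA_cntLoop a t a.length k cnt
        = cnt + (((a.drop k).filter (fun x => decide (x < t))).length : Int) := by
  intro m
  induction m with
  | zero =>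
    intro k cnt h
    have hk : ¬ k < a.length := by omega
    rw [pvA_cntLoop, if_neg hk, List.drop_eq_nil_of_le (by omega)]
    simp
  | succ m ih =>
    intro k cnt h
    rw [pvA_cntLoop]
    by_cases hk : k < a.length
    · rw [if_pos hk]
      by_cases hc : t ≤ a.getD k 0
      · rw [if_pos hc]
        have : (a.drop k).filter (fun x => decide (x < t)) = [] := by
          rw [List.filter_eq_nil_iff]
          intro x hx
          rcases List.mem_iff_getElem.mp hx with ⟨q, hq, hxq⟩
          have hq' : k + q < a.length := by simp at hq; omega
          have h1 : x = a.getD (k+q) 0 := by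
            rw [List.getD_eq_getElem a 0 hq', ← hxq]
            exact List.getElem_drop
          have h2 : a.getD k 0 ≤ a.getD (k+q) 0 := hsort k (k+q) (by omega) hq'
          simp only [h1, decide_eq_true_eq, not_lt]
          omega
        rw [this]; simp
      · rw [if_neg hc, ih (k+1) _ (by omega),
          List.drop_eq_getElem_cons hk, List.filter_cons,
          if_pos (by simp only [decide_eq_true_eq]
                     rw [← List.getD_eq_getElem a 0 hk]; omega)]
        simp only [List.length_cons]
        push_cast
        ring
    · rw [if_neg hk, List.drop_eq_nil_of_le (by omega)]
      simp

lemma pv_sorted_mono (nums : List Int) :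
    ∀ p q, p ≤ q →
      q < (PySem.List.sorted (PySem.Set.ofList nums) (fun x => x) false).length →
      (PySem.List.sorted (PySem.Set.ofList nums) (fun x => x) false).getD p 0
        ≤ (PySem.List.sorted (PySem.Set.ofList nums) (fun x => x) false).getD q 0 := by
  intro p q hpq hq
  rw [List.getD_eq_getElem _ 0 (by omega), List.getD_eq_getElem _ 0 hq]
  exact PySem.List.sorted_id_getElem_mono (PySem.Set.ofList nums) hpq hq

-- ===== VERDICT (by name: the statement is the Claim_ definition above) =====
theorem numberOfSet_spec : Claim_equal_numberOfSet := by
  intro nums target _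
  unfold Spec_numberOfSet numberOfSet numberOfSet_alt
  set a := PySem.List.sorted (PySem.Set.ofList nums) (fun x => x) false with ha
  have hlen : (PySem.Set.ofList nums).length = a.length := by
    rw [ha, PySem.List.length_sorted]
  have hsort := pv_sorted_mono nums
  rw [← ha] at hsort
  simp only [hlen]
  by_cases hn : a.length = 0
  · have hnil : a = [] := List.length_eq_zero_iff.mp hn
    rw [hnil]
    simp [pvA_outer, pvA_cntLoop, pvB_twoPtr]
  · rw [pvA_outer_eq a target a.length a.length 0 _ (by omega),
      pvA_cntLoop_eq a target hsort a.length 0 0 (by omega),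
      pvB_twoPtr_eq a target hsort a.length 0 (a.length - 1)
        _ (by omega) (by omega) (fun i j h1 h2 h3 h4 => by omega)]
    simp
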